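-- pv_equiv track=rewrite | github.com/tacticalowlman/Google-Foobar | pie-minions-sry-i-dont-remember-name.py | solution
-- ===== SOURCE A (Python) =====
-- def solution(s):
--     s_len = len(s)
--     current_sq = ''
--     max_parts_amount = 1
--     for i in s:
--         current_sq += i
--         current_sq_len = len(current_sq)
--         checked_parts = 1
--         valid_part = True
--         if s_len % current_sq_len == 0:
--             while checked_parts < s_len // current_sq_len and valid_part:
--                 if current_sq != s[(current_sq_len * checked_parts):(current_sq_len * (checked_parts + 1))]:
--                     valid_part = False
--                 else:
--                     max_parts_amount += 1
--                     checked_parts += 1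
--         else:
--             valid_part = False
--         if valid_part:
--             return max_parts_amount
--         else:
--             max_parts_amount = 1
-- ===== SOURCE B (Python) =====
-- def solution(s):
--     n = len(s)
--
--     def longest_border(m):
--         # longest proper border (prefix == suffix) of s[:m]
--         for b in range(m - 1, 0, -1):
--             if s[:b] == s[m - b:m]:
--                 return b
--         return 0
--
--     # walk the border chain of s downward until the corresponding period divides n
--     b = longest_border(n)
--     while b and n % (n - b):
--         b = longest_border(b)
--     return n // (n - b)
-- ===== Notes on version B (the rewrite author's own statement) =====
-- stated objective: alternative
-- what changed: A scans candidate block lengths ascending, rebuilding the candidate prefix character by character and comparing every block in an inner loop; B works with borders instead of tilings: it finds the longest proper border of s and walks the border chain downward until the corresponding period n-b divides n, returning n//(n-b).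
-- outside the precondition, e.g. on solution(''): A returns None, B raises ZeroDivisionError
import Mathlib
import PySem

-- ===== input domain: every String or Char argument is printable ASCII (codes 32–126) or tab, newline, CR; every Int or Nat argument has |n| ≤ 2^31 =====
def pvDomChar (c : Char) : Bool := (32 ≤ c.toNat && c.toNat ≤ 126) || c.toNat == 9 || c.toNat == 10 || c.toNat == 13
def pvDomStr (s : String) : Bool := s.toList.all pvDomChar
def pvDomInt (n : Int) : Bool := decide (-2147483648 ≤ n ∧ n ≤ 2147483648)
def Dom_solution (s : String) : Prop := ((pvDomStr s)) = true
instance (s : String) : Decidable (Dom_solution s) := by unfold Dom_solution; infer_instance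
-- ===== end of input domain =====

-- B replaces A's ascending scan over block lengths (rebuilding the candidate prefix and comparing
-- block after block) by a border-chain walk: compute the longest proper border of s and follow the
-- border chain downward until the corresponding period n-b divides n; answer n // (n-b).

-- ===== PORT A =====
-- inner while loop: `while checked_parts < s_len // current_sq_len and valid_part`;
-- fuel is the remaining iteration count (s_len // current_sq_len - checked_parts), exact here
def aInner (sl cur : List Char) (curLen checked maxp : Int) : Nat → Int × Bool
  | 0 => (maxp, true)
  | Nat.succ f =>
    if cur ≠ PySem.List.slice sl (some (curLen * checked)) (some (curLen * (checked + 1))) then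
      (maxp, false)
    else aInner sl cur curLen (checked + 1) (maxp + 1) f

-- the `for i in s` loop; returns 0 where Python falls off the loop returning None (excluded by Pre_)
def aLoop (sl : List Char) (n : Int) : List Char → List Char → Int → Int
  | [], _cur, _maxp => 0
  | c :: rest, cur, maxp =>
    let cur' := cur ++ [c]
    let len : Int := (cur'.length : Int)
    if PySem.Int.mod n len = 0 then
      let r := aInner sl cur' len 1 maxp (PySem.Int.floordiv n len - 1).toNat
      if r.2 then r.1 else aLoop sl n rest cur' 1
    else aLoop sl n rest cur' 1

def solution (s : String) : Int :=
  let sl := s.toList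
  aLoop sl (sl.length : Int) sl [] 1

-- ===== PORT B =====
-- `for b in range(m-1, 0, -1): if s[:b] == s[m-b:m]: return b` / `return 0`;
-- the recursion argument is the current candidate b (0 = range exhausted)
def lbAux (sl : List Char) (m : Nat) : Nat → Nat
  | 0 => 0
  | b + 1 =>
    if PySem.List.slice sl none (some ((b + 1 : Nat) : Int)) =
        PySem.List.slice sl (some ((m : Int) - ((b + 1 : Nat) : Int))) (some (m : Int)) then
      b + 1
    else lbAux sl m b

def longestBorder (sl : List Char) (m : Nat) : Nat := lbAux sl m (m - 1)

-- cited by walk's decreasing_by: the returned border is at most the first candidate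
lemma lbAux_le (sl : List Char) (m : Nat) : ∀ k, lbAux sl m k ≤ k
  | 0 => by simp [lbAux]
  | k + 1 => by
    simp only [lbAux]
    split
    · exact le_refl _
    · exact Nat.le_succ_of_le (lbAux_le sl m k)

-- `while b and n % (n - b): b = longest_border(b)`
def walk (sl : List Char) (n : Nat) (b : Nat) : Nat :=
  if _h : b ≠ 0 ∧ n % (n - b) ≠ 0 then walk sl n (longestBorder sl b) else b
  termination_by b
  decreasing_by
    have hle := lbAux_le sl b (b - 1)
    simp only [longestBorder]
    omega

def solution_alt (s : String) : Int :=
  let sl := s.toList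
  let n := sl.length
  let b := walk sl n (longestBorder sl n)
  PySem.Int.floordiv (n : Int) ((n : Int) - (b : Int))

-- ===== PRECONDITION & SPEC =====
-- Pre_ excludes only the empty string: Python A falls off its loop and returns None (not an Int)
-- and Python B raises ZeroDivisionError there.
def Pre_solution (s : String) : Prop := s ≠ ""
instance (s : String) : Decidable (Pre_solution s) := by unfold Pre_solution; infer_instance
def pvWitness_solution : String := "abab"

def Spec_solution (s : String) (out : Int) : Prop := out = solution_alt s
instance (s : String) (out : Int) : Decidable (Spec_solution s out) := by unfold Spec_solution; infer_instance

-- ===== CLAIM (what is proved, stated in full; the proofs are below) =====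
def Claim_equal_solution : Prop := ∀ (s : String), Dom_solution s → Pre_solution s → Spec_solution s (solution s)

-- ===== LEMMAS AND PROOFS =====

-- b is a (not necessarily proper) border of the prefix sl.take m (used with b ≤ m ≤ sl.length)
def PB (sl : List Char) (m b : Nat) : Prop := (sl.drop (m - b)).take b = sl.take b

-- block length L tiles sl (the condition A's scan tests, in Nat form)
def OkN (sl : List Char) (L : Nat) : Prop :=
  sl.length % L = 0 ∧ (List.replicate (sl.length / L) (sl.take L)).flatten = sl

-- proof-side helper: A's scan re-expressed as an ascending scan over block lengths
def bLoop (sl : List Char) (n : Int) : Nat → Int → Int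
  | 0, _ => 0
  | Nat.succ f, L =>
    if PySem.Int.mod n L = 0 ∧
        (List.replicate (PySem.Int.floordiv n L).toNat (PySem.List.slice sl none (some L))).flatten = sl
    then PySem.Int.floordiv n L
    else bLoop sl n f (L + 1)

lemma aInner_snd (fuel : Nat) : ∀ (sl cur : List Char) (L c0 : Nat) (maxp : Int),
    (aInner sl cur (L : Int) (c0 : Int) maxp fuel).2 = true ↔
      ∀ j < fuel, cur = (sl.drop (L * (c0 + j))).take L := by
  induction fuel with
  | zero => intro sl cur L c0 maxp; simp [aInner]
  | succ f ih =>
    intro sl cur L c0 maxp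
    have hc1 : ((c0 : Int) + 1) = ((c0 + 1 : Nat) : Int) := by push_cast; ring
    have hsl : PySem.List.slice sl (some ((L : Int) * (c0 : Int))) (some ((L : Int) * ((c0 + 1 : Nat) : Int)))
        = (sl.drop (L * c0)).take L := by
      have h1 : ((L : Int) * (c0 : Int)) = ((L * c0 : Nat) : Int) := by push_cast; ring
      have h2 : ((L : Int) * ((c0 + 1 : Nat) : Int)) = ((L * c0 : Nat) : Int) + ((L : Nat) : Int) := by
        push_cast; ring
      rw [h1, h2, PySem.List.slice_natCast_add]
    simp only [aInner, hc1, hsl]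
    by_cases h : cur = (sl.drop (L * c0)).take L
    · rw [if_neg (by simp [h]), ih]
      constructor
      · intro hall j hj
        rcases Nat.eq_zero_or_pos j with hj0 | hj0
        · subst hj0; simpa using h
        · have := hall (j - 1) (by omega)
          have hje : c0 + 1 + (j - 1) = c0 + j := by omega
          rwa [hje] at this
      · intro hall j hj
        have := hall (j + 1) (by omega)
        have hje : c0 + (j + 1) = c0 + 1 + j := by omega
        rwa [hje] at this
    · rw [if_pos (by simp [h])]
      constructor
      · intro hc; cases hc
      · intro hall
        exact absurd (by simpa using hall 0 (by omega)) h

lemma aInner_fst (fuel : Nat) : ∀ (sl cur : List Char) (L c0 : Nat) (maxp : Int),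
    (∀ j < fuel, cur = (sl.drop (L * (c0 + j))).take L) →
      (aInner sl cur (L : Int) (c0 : Int) maxp fuel).1 = maxp + fuel := by
  induction fuel with
  | zero => intro sl cur L c0 maxp _; simp [aInner]
  | succ f ih =>
    intro sl cur L c0 maxp hall
    have hc1 : ((c0 : Int) + 1) = ((c0 + 1 : Nat) : Int) := by push_cast; ring
    have hsl : PySem.List.slice sl (some ((L : Int) * (c0 : Int))) (some ((L : Int) * ((c0 + 1 : Nat) : Int)))
        = (sl.drop (L * c0)).take L := by
      have h1 : ((L : Int) * (c0 : Int)) = ((L * c0 : Nat) : Int) := by push_cast; ring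
      have h2 : ((L : Int) * ((c0 + 1 : Nat) : Int)) = ((L * c0 : Nat) : Int) + ((L : Nat) : Int) := by
        push_cast; ring
      rw [h1, h2, PySem.List.slice_natCast_add]
    have h0 : cur = (sl.drop (L * c0)).take L := by simpa using hall 0 (by omega)
    simp only [aInner, hc1, hsl]
    rw [if_neg (by simp [h0])]
    rw [ih sl cur L (c0 + 1) (maxp + 1) (by
      intro j hj
      have := hall (j + 1) (by omega)
      have hje : c0 + (j + 1) = c0 + 1 + j := by omega
      rwa [hje] at this)]
    push_cast; ring

lemma tile_of_blocks : ∀ (k : Nat) (L : Nat) (sl cur : List Char), cur.length = L →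
    sl.length = k * L → (∀ j < k, (sl.drop (L * j)).take L = cur) →
    (List.replicate k cur).flatten = sl := by
  intro k
  induction k with
  | zero => intro L sl cur _ hlen _; simp at hlen ⊢; omega
  | succ k ih =>
    intro L sl cur hcur hlen hall
    have h0 : sl.take L = cur := by simpa using hall 0 (by omega)
    have hrest : (List.replicate k cur).flatten = sl.drop L := by
      apply ih L _ cur hcur
      · simp [hlen]; ring_nf; omega
      · intro j hj
        rw [List.drop_drop]
        have heq : L + L * j = L * (j + 1) := by ring
        rw [heq]
        exact hall (j + 1) (by omega)
    calc (List.replicate (k + 1) cur).flatten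
        = cur ++ (List.replicate k cur).flatten := by simp [List.replicate_succ]
      _ = sl.take L ++ sl.drop L := by rw [h0, hrest]
      _ = sl := List.take_append_drop L sl

lemma blocks_of_tile : ∀ (j k : Nat) (L : Nat) (cur : List Char), cur.length = L → j < k →
    (((List.replicate k cur).flatten.drop (L * j)).take L) = cur := by
  intro j
  induction j with
  | zero =>
    intro k L cur hcur hk
    cases k with
    | zero => omega
    | succ k =>
      simp only [List.replicate_succ, List.flatten_cons, Nat.mul_zero, List.drop_zero]
      rw [List.take_append_of_le_length (by omega)]
      simp [← hcur]
  | succ j ih =>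
    intro k L cur hcur hk
    cases k with
    | zero => omega
    | succ k =>
      simp only [List.replicate_succ, List.flatten_cons]
      have hmul : L * (j + 1) = cur.length + L * j := by rw [hcur]; ring
      rw [hmul, List.drop_length_add_append]
      exact ih k L cur hcur (by omega)

lemma scan (rest : List Char) : ∀ (sl cur : List Char), sl = cur ++ rest →
    aLoop sl (sl.length : Int) rest cur 1 = bLoop sl (sl.length : Int) rest.length ((cur.length : Int) + 1) := by
  induction rest with
  | nil => intro sl cur _; simp [aLoop, bLoop]
  | cons c rest ih =>
    intro sl cur hsl
    set n := sl.length with hn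
    set L := cur.length + 1 with hL
    have hsl' : sl = (cur ++ [c]) ++ rest := by simpa using hsl
    have hcur'len : (cur ++ [c]).length = L := by simp [hL]
    have hLpos : 0 < L := by omega
    have hLle : L ≤ n := by
      rw [hn, hsl', List.length_append, hcur'len]; omega
    have hcastL : ((cur.length : Int) + 1) = (L : Int) := by push_cast [hL]; ring
    have htake : sl.take L = cur ++ [c] := by
      rw [hsl', ← hcur'len, List.take_left]
    by_cases hdvd : L ∣ n
    · -- length divides: A runs the inner block check, B tests the replicate equality
      have hk1 : 1 ≤ n / L := (Nat.one_le_div_iff hLpos).mpr hLle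
      have hmodn : n % L = 0 := Nat.dvd_iff_mod_eq_zero.mp hdvd
      have hmodA : PySem.Int.mod (n : Int) ((cur ++ [c]).length : Int) = 0 := by
        rw [hcur'len, PySem.Int.mod_natCast, hmodn]; rfl
      have hmodB : PySem.Int.mod (n : Int) ((cur.length : Int) + 1) = 0 := by
        rw [hcastL]; rwa [hcur'len] at hmodA
      have hfuel : (PySem.Int.floordiv (n : Int) ((cur ++ [c]).length : Int) - 1).toNat = n / L - 1 := by
        rw [hcur'len, PySem.Int.floordiv_natCast]; omega
      have hfloorB : PySem.Int.floordiv (n : Int) ((cur.length : Int) + 1) = ((n / L : Nat) : Int) := by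
        rw [hcastL, PySem.Int.floordiv_natCast]
      have hsliceB : PySem.List.slice sl none (some ((cur.length : Int) + 1)) = cur ++ [c] := by
        rw [hcastL, PySem.List.slice_to_natCast, htake]
      have hone : (1 : Int) = ((1 : Nat) : Int) := by norm_num
      have hvalid : (aInner sl (cur ++ [c]) ((cur ++ [c]).length : Int) 1 1 (n / L - 1)).2 = true ↔
          (List.replicate (n / L) (cur ++ [c])).flatten = sl := by
        rw [hcur'len, hone, aInner_snd]
        constructor
        · intro hall
          apply tile_of_blocks (n / L) L sl (cur ++ [c]) hcur'len (Nat.div_mul_cancel hdvd).symm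
          intro j hj
          rcases Nat.eq_zero_or_pos j with hj0 | hj0
          · subst hj0; simpa using htake
          · have := hall (j - 1) (by omega)
            have hje : 1 + (j - 1) = j := by omega
            rw [hje] at this
            exact this.symm
        · intro htile j hj
          rw [← htile]
          exact (blocks_of_tile (1 + j) (n / L) L (cur ++ [c]) hcur'len (by omega)).symm
      simp only [aLoop, bLoop, List.length_cons, hmodA, if_true, hfuel]
      by_cases htile : (List.replicate (n / L) (cur ++ [c])).flatten = sl
      · -- both return n / L
        have hall : ∀ j < n / L - 1, cur ++ [c] = (sl.drop (L * (1 + j))).take L := by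
          intro j hj
          rw [← htile]
          exact (blocks_of_tile (1 + j) (n / L) L (cur ++ [c]) hcur'len (by omega)).symm
        have hsnd : (aInner sl (cur ++ [c]) ((cur ++ [c]).length : Int) 1 1 (n / L - 1)).2 = true := by
          rw [hcur'len, hone, aInner_snd]; exact hall
        rw [if_pos hsnd]
        have hfst : (aInner sl (cur ++ [c]) ((cur ++ [c]).length : Int) 1 1 (n / L - 1)).1
            = 1 + ((n / L - 1 : Nat) : Int) := by
          rw [hcur'len, hone]
          exact aInner_fst (n / L - 1) sl (cur ++ [c]) L 1 1 hall
        rw [hfst, if_pos ⟨hmodB, by rw [hfloorB, hsliceB]; exact htile⟩, hfloorB]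
        omega
      · -- both fall through to the next length
        rw [if_neg (by rw [hvalid]; exact htile)]
        rw [if_neg (by
          rintro ⟨-, hc⟩
          rw [hfloorB, hsliceB] at hc
          exact htile hc)]
        have := ih sl (cur ++ [c]) hsl'
        rw [hcur'len] at this
        rw [this, hcastL]
    · -- length does not divide: both sides fall through to the next length
      have hmodA : ¬ PySem.Int.mod (n : Int) ((cur ++ [c]).length : Int) = 0 := by
        rw [hcur'len, PySem.Int.mod_natCast]
        intro h
        exact hdvd (Nat.dvd_of_mod_eq_zero (by exact_mod_cast h))
      have hmodB : ¬ PySem.Int.mod (n : Int) ((cur.length : Int) + 1) = 0 := by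
        rw [hcastL]; rwa [hcur'len] at hmodA
      simp only [aLoop, bLoop, List.length_cons, hmodA, if_false, hmodB, false_and, if_false]
      have := ih sl (cur ++ [c]) hsl'
      rw [hcur'len] at this
      rw [this, hcastL]

-- lbAux returns the longest b ≤ k that is a border of sl.take m
lemma lbAux_spec (sl : List Char) (m : Nat) : ∀ k, k < m →
    PB sl m (lbAux sl m k) ∧ ∀ b, b ≤ k → PB sl m b → b ≤ lbAux sl m k := by
  intro k
  induction k with
  | zero =>
    intro _
    refine ⟨by simp [lbAux, PB], ?_⟩
    intro b hb _; simp [lbAux]; omega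
  | succ k ih =>
    intro hk
    have hcond : (PySem.List.slice sl none (some ((k + 1 : Nat) : Int)) =
        PySem.List.slice sl (some ((m : Int) - ((k + 1 : Nat) : Int))) (some (m : Int)))
        ↔ PB sl m (k + 1) := by
      have hle' : k + 1 ≤ m := by omega
      have h1 : ((m : Int) - ((k + 1 : Nat) : Int)) = ((m - (k + 1) : Nat) : Int) := by
        push_cast [hle']; ring
      have h2 : (m : Int) = ((m - (k + 1) : Nat) : Int) + ((k + 1 : Nat) : Int) := by
        push_cast [hle']; ring
      rw [h1, h2, PySem.List.slice_natCast_add, PySem.List.slice_to_natCast]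
      unfold PB
      exact ⟨fun h => h.symm, fun h => h.symm⟩
    simp only [lbAux]
    by_cases hc : PB sl m (k + 1)
    · rw [if_pos (hcond.mpr hc)]
      exact ⟨hc, fun b hb _ => hb⟩
    · rw [if_neg (fun h => hc (hcond.mp h))]
      obtain ⟨hpb, hmax⟩ := ih (by omega)
      refine ⟨hpb, ?_⟩
      intro b hb hpb'
      rcases Nat.lt_or_ge b (k + 1) with h | h
      · exact hmax b (by omega) hpb'
      · have hbe : b = k + 1 := by omega
        rw [hbe] at hpb'
        exact absurd hpb' hc

-- a shorter border of the same prefix is a border of the longer border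
lemma PB_trans_down (sl : List Char) (m a b : Nat) (hab : a ≤ b) (hbm : b ≤ m)
    (ha : PB sl m a) (hb : PB sl m b) : PB sl b a := by
  unfold PB at *
  have step : ((sl.drop (m - b)).take b).drop (b - a) = (sl.take b).drop (b - a) := by
    rw [hb]
  rw [List.drop_take, List.drop_take, List.drop_drop] at step
  have e1 : m - b + (b - a) = m - a := by omega
  have e2 : b - (b - a) = a := by omega
  rw [e1, e2] at step
  rw [← step]
  exact ha

lemma PB_trans_up (sl : List Char) (m a b : Nat) (hab : a ≤ b) (hbm : b ≤ m)
    (hba : PB sl b a) (hb : PB sl m b) : PB sl m a := by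
  unfold PB at *
  have step : ((sl.drop (m - b)).take b).drop (b - a) = (sl.take b).drop (b - a) := by
    rw [hb]
  rw [List.drop_take, List.drop_take, List.drop_drop] at step
  have e1 : m - b + (b - a) = m - a := by omega
  have e2 : b - (b - a) = a := by omega
  rw [e1, e2] at step
  rw [step]
  exact hba

-- the walk returns the largest border whose period divides n
lemma walk_spec (sl : List Char) (n : Nat) : ∀ b, b < n → PB sl n b →
    (∀ b', b' < n → PB sl n b' → (n - b') ∣ n → b' ≤ b) →
    PB sl n (walk sl n b) ∧ walk sl n b < n ∧ (n - walk sl n b) ∣ n ∧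
      (∀ b', b' < n → PB sl n b' → (n - b') ∣ n → b' ≤ walk sl n b) := by
  intro b
  induction b using Nat.strong_induction_on with
  | _ b ih =>
    intro hbn hpb hmax
    rw [walk]
    by_cases hc : b ≠ 0 ∧ n % (n - b) ≠ 0
    · rw [dif_pos hc]
      have hb0 : b ≠ 0 := hc.1
      obtain ⟨hpb1, hmax1⟩ := lbAux_spec sl b (b - 1) (by omega)
      have hle : lbAux sl b (b - 1) ≤ b - 1 := lbAux_le sl b (b - 1)
      have hlt : longestBorder sl b < b := by simp only [longestBorder]; omega
      have hpbn : PB sl n (longestBorder sl b) :=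
        PB_trans_up sl n (longestBorder sl b) b (by omega) (by omega) hpb1 hpb
      apply ih (longestBorder sl b) hlt (by omega) hpbn
      intro b' hb'n hpb' hdvd'
      have hb'b : b' ≤ b := hmax b' hb'n hpb' hdvd'
      have hne : b' ≠ b := by
        intro h
        subst h
        exact hc.2 (Nat.dvd_iff_mod_eq_zero.mp hdvd')
      have hb'lt : b' < b := by omega
      have hpb'' : PB sl b b' := PB_trans_down sl n b' b (by omega) (by omega) hpb' hpb
      exact hmax1 b' (by omega) hpb''
    · rw [dif_neg hc]
      have hdvd : (n - b) ∣ n := by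
        rcases Decidable.not_and_iff_or_not.mp hc with h | h
        · have hb0 : b = 0 := by omega
          subst hb0; simp
        · have : n % (n - b) = 0 := by omega
          exact Nat.dvd_of_mod_eq_zero this
      exact ⟨hpb, hbn, hdvd, hmax⟩

-- the tiling condition in Nat form ⟺ n-L is a border and L divides n
lemma ok_iff (sl : List Char) (L : Nat) (h1 : 1 ≤ L) (h2 : L ≤ sl.length) :
    OkN sl L ↔ (L ∣ sl.length ∧ PB sl sl.length (sl.length - L)) := by
  unfold OkN PB
  set n := sl.length with hn
  set k := n / L with hk
  constructor
  · rintro ⟨hmod, htile⟩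
    have hdvd : L ∣ n := Nat.dvd_of_mod_eq_zero hmod
    refine ⟨hdvd, ?_⟩
    have hk1 : 1 ≤ k := by rw [hk]; exact (Nat.one_le_div_iff (by omega)).mpr h2
    have hnkL : n = k * L := (Nat.div_mul_cancel hdvd).symm
    obtain ⟨k', hk'⟩ : ∃ k', k = k' + 1 := ⟨k - 1, by omega⟩
    have hcurlen : (sl.take L).length = L := by rw [List.length_take]; omega
    have hFlen : (List.replicate k' (sl.take L)).flatten.length = k' * L := by
      simp [hcurlen]
    have hsplit1 : sl = sl.take L ++ (List.replicate k' (sl.take L)).flatten := by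
      conv_lhs => rw [← htile]
      rw [hk', List.replicate_succ, List.flatten_cons]
    have hsplit2 : sl = (List.replicate k' (sl.take L)).flatten ++ sl.take L := by
      conv_lhs => rw [← htile]
      rw [hk', List.replicate_succ', List.flatten_append]
      simp
    have hnk' : n = k' * L + L := by rw [hnkL, hk']; ring
    have hd : sl.drop (n - (n - L)) = (List.replicate k' (sl.take L)).flatten := by
      rw [show n - (n - L) = L from by omega]
      conv_lhs => rw [hsplit1]
      exact List.drop_left' hcurlen
    have ht : sl.take (n - L) = (List.replicate k' (sl.take L)).flatten := by
      conv_lhs => rw [hsplit2]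
      exact List.take_left' (by rw [hFlen]; omega)
    rw [hd, ht, List.take_of_length_le (by rw [hFlen]; omega)]
  · rintro ⟨hdvd, hpb⟩
    have hnkL : n = k * L := (Nat.div_mul_cancel hdvd).symm
    have hk1 : 1 ≤ k := by rw [hk]; exact (Nat.one_le_div_iff (by omega)).mpr h2
    refine ⟨Nat.dvd_iff_mod_eq_zero.mp hdvd, ?_⟩
    have hEq : sl.drop L = sl.take (n - L) := by
      have hdl : (sl.drop L).length = n - L := by simp [hn]
      have hpb' := hpb
      rw [show n - (n - L) = L from by omega] at hpb'
      rw [← hpb', List.take_of_length_le (by omega)]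
    have hblocks : ∀ j, j < k → (sl.drop (L * j)).take L = sl.take L := by
      intro j
      induction j with
      | zero => intro _; simp
      | succ j ihj =>
        intro hjk
        have hstep : sl.drop (L * (j + 1)) = (sl.drop L).drop (L * j) := by
          rw [List.drop_drop]
          congr 1
          ring
        rw [hstep, hEq, List.drop_take]
        have hmul : (j + 2) * L ≤ n := by
          rw [hnkL]
          exact Nat.mul_le_mul_right L (by omega)
        have hexp : (j + 2) * L = L * j + 2 * L := by ring
        rw [List.take_take, min_eq_left (by omega)]
        exact ihj (by omega)
    exact tile_of_blocks k L sl (sl.take L) (by rw [List.length_take]; omega) hnkL hblocks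

-- n itself always tiles a nonempty sl
lemma ok_len (sl : List Char) (h : 1 ≤ sl.length) : OkN sl sl.length := by
  refine ⟨Nat.mod_self _, ?_⟩
  rw [Nat.div_self (by omega)]
  simp

-- the ascending scan returns n / L for the least tiling length L
lemma bLoop_min (sl : List Char) : ∀ (fuel L0 : Nat), 1 ≤ L0 → L0 + fuel = sl.length + 1 →
    1 ≤ sl.length → (∀ L', 1 ≤ L' → L' < L0 → ¬ OkN sl L') →
    ∃ X, L0 ≤ X ∧ X ≤ sl.length ∧ OkN sl X ∧ (∀ L', 1 ≤ L' → L' < X → ¬ OkN sl L') ∧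
      bLoop sl (sl.length : Int) fuel (L0 : Int) = ((sl.length / X : Nat) : Int) := by
  intro fuel
  induction fuel with
  | zero =>
    intro L0 h1 h2 h3 h4
    exact absurd (ok_len sl h3) (h4 sl.length h3 (by omega))
  | succ f ih =>
    intro L0 h1 h2 h3 h4
    set n := sl.length with hn
    have hcond : (PySem.Int.mod (n : Int) (L0 : Int) = 0 ∧
        (List.replicate (PySem.Int.floordiv (n : Int) (L0 : Int)).toNat
          (PySem.List.slice sl none (some (L0 : Int)))).flatten = sl) ↔ OkN sl L0 := by
      rw [PySem.Int.mod_natCast, PySem.Int.floordiv_natCast, PySem.List.slice_to_natCast]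
      unfold OkN
      constructor
      · rintro ⟨ha, hb⟩
        exact ⟨by exact_mod_cast ha, by simpa using hb⟩
      · rintro ⟨ha, hb⟩
        exact ⟨by exact_mod_cast ha, by simpa using hb⟩
    simp only [bLoop]
    by_cases hok : OkN sl L0
    · rw [if_pos (hcond.mpr hok)]
      exact ⟨L0, le_refl _, by omega, hok, h4, by rw [PySem.Int.floordiv_natCast]⟩
    · rw [if_neg (fun h => hok (hcond.mp h))]
      have hcast : ((L0 : Int) + 1) = ((L0 + 1 : Nat) : Int) := by push_cast; ring
      rw [hcast]
      obtain ⟨X, hX1, hX2, hX3, hX4, hX5⟩ := ih (L0 + 1) (by omega) (by omega) h3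
        (by
          intro L' hL1 hL2
          rcases Nat.lt_or_ge L' L0 with h | h
          · exact h4 L' hL1 h
          · have : L' = L0 := by omega
            rw [this]; exact hok)
      exact ⟨X, by omega, hX2, hX3, hX4, hX5⟩

-- ===== VERDICT (by name: the statement is the Claim_ definition above) =====
theorem solution_spec : Claim_equal_solution := by
  intro s _ hpre
  unfold Spec_solution
  simp only [solution, solution_alt]
  have hnil : s.toList ≠ [] := by simp_all [Pre_solution]
  set sl := s.toList with hsl
  set n := sl.length with hn
  have hn1 : 1 ≤ n := by
    cases hh : sl with
    | nil => exact absurd hh hnil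
    | cons x xs => rw [hn, hh]; simp
  -- A's loop equals the ascending scan
  have hA : aLoop sl (n : Int) sl [] 1 = bLoop sl (n : Int) n 1 := by
    have := scan sl sl [] (by simp)
    simpa [← hn] using this
  obtain ⟨X, hX1, hX2, hX3, hX4, hXeq⟩ := bLoop_min sl n 1 (le_refl 1) (by omega) hn1
    (by intro L' hL1 hL2; omega)
  -- B's walk
  obtain ⟨hpb0, hmax0⟩ := lbAux_spec sl n (n - 1) (by omega)
  have hb0le : lbAux sl n (n - 1) ≤ n - 1 := lbAux_le sl n (n - 1)
  have hb0pb : PB sl n (longestBorder sl n) := by simpa [longestBorder] using hpb0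
  have hb0lt : longestBorder sl n < n := by simp only [longestBorder]; omega
  obtain ⟨hpbr, hrlt, hrdvd, hrmax⟩ := walk_spec sl n (longestBorder sl n) hb0lt hb0pb
    (by
      intro b' hb'n hpb' _
      have := hmax0 b' (by omega) hpb'
      simpa [longestBorder] using this)
  set r := walk sl n (longestBorder sl n) with hr
  -- n - r satisfies the tiling condition
  have hY : OkN sl (n - r) := by
    rw [ok_iff sl (n - r) (by omega) (by omega)]
    exact ⟨by rw [← hn]; exact hrdvd,
      by rw [← hn, show n - (n - r) = r from by omega]; exact hpbr⟩
  have hXY1 : X ≤ n - r := by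
    by_contra h
    exact hX4 (n - r) (by omega) (by omega) hY
  obtain ⟨hXdvd, hXpb⟩ := (ok_iff sl X hX1 (by rw [← hn]; exact hX2)).mp hX3
  have hXY2 : n - X ≤ r := by
    apply hrmax (n - X) (by omega)
    · rw [hn]; exact hXpb
    · rw [show n - (n - X) = X from by omega, hn]; exact hXdvd
  have hXr : X = n - r := by omega
  rw [← hn] at hXeq
  rw [Nat.cast_one] at hXeq
  rw [hA, hXeq, hXr,
    show ((n : Int) - (r : Int)) = ((n - r : Nat) : Int) from by omega,
    PySem.Int.floordiv_natCast]
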